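-- pv_equiv track=rewrite | github.com/LeoSprr/Convert-file-to-amylofit-format | amyloconverter.py | is_well_saturated
-- ===== SOURCE A (Python) =====
-- MIN_CONSECUTIVE_ROOF = 5
--
-- MIN_ROOF_IN_LAST_10  = 5
--
-- def is_well_saturated(values, roof_value):
--     max_consecutive = 0
--     current_run = 0
--     for v in values:
--         if v == roof_value:
--             current_run += 1
--             if current_run > max_consecutive:
--                 max_consecutive = current_run
--         else:
--             current_run = 0
--
--     last_10 = values[-10:]
--     roof_in_last_10 = sum(1 for v in last_10 if v == roof_value)
--
--     return max_consecutive >= MIN_CONSECUTIVE_ROOF and roof_in_last_10 >= MIN_ROOF_IN_LAST_10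
-- ===== SOURCE B (Python) =====
-- MIN_CONSECUTIVE_ROOF = 5
--
-- MIN_ROOF_IN_LAST_10  = 5
--
-- def is_well_saturated(values, roof_value):
--     # Build the maximal runs of equal values (groupby-style), then reduce over the runs.
--     runs = []
--     i = 0
--     n = len(values)
--     while i < n:
--         j = i
--         while j < n and values[j] == values[i]:
--             j += 1
--         runs.append((values[i], j - i))
--         i = j
--     max_run = max((length for key, length in runs if key == roof_value), default=0)
--     return max_run >= MIN_CONSECUTIVE_ROOF and values[-10:].count(roof_value) >= MIN_ROOF_IN_LAST_10
-- ===== Notes on version B (the rewrite author's own statement) =====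
-- stated objective: alternative
-- what changed: B replaces A's incremental running-counter scan by a groupby-style decomposition: it first builds the list of maximal runs of equal values, then reduces that run list with max(..., default=0) over the runs keyed by roof_value, and uses list.count on values[-10:] for the tail check.
import Mathlib
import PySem

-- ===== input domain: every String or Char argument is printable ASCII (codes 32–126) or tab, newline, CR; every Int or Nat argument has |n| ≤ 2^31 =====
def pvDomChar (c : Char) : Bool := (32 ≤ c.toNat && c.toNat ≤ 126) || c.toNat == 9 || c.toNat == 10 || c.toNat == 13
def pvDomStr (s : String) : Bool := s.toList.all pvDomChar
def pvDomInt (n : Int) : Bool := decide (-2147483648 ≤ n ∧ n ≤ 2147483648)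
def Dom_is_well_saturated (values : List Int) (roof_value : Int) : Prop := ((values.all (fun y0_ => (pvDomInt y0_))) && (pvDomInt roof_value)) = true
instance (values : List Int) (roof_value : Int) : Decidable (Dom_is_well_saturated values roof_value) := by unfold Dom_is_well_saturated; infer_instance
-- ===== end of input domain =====

-- B builds the maximal runs of equal values (groupby-style) and reduces over the run list,
-- instead of A's incremental running-counter scan; objective: idiomatic/alternative decomposition.

-- ===== PORT A =====
def MIN_CONSECUTIVE_ROOF : Int := 5
def MIN_ROOF_IN_LAST_10 : Int := 5

def is_well_saturated (values : List Int) (roof_value : Int) : Bool :=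
  let st := values.foldl
    (fun (p : Int × Int) v =>
      if v == roof_value then
        let cur := p.2 + 1
        (if cur > p.1 then cur else p.1, cur)
      else (p.1, 0)) ((0 : Int), (0 : Int))
  let last_10 := PySem.List.slice values (some (-10)) none
  let roof_in_last_10 :=
    last_10.foldl (fun (acc : Int) v => if v == roof_value then acc + 1 else acc) 0
  decide (MIN_CONSECUTIVE_ROOF ≤ st.1) && decide (MIN_ROOF_IN_LAST_10 ≤ roof_in_last_10)

-- ===== PORT B =====
-- inner while loop: length of the prefix of xs equal to k
def pvRunLen (k : Int) : List Int → Nat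
  | [] => 0
  | x :: xs => if x == k then pvRunLen k xs + 1 else 0

-- outer while loop: list of (key, run length) for the maximal runs
def pvBuildRuns : List Int → List (Int × Int)
  | [] => []
  | x :: xs =>
    (x, (pvRunLen x xs : Int) + 1) :: pvBuildRuns (xs.drop (pvRunLen x xs))
termination_by l => l.length
decreasing_by
  simp only [List.length_drop, List.length_cons]
  omega

def is_well_saturated_alt (values : List Int) (roof_value : Int) : Bool :=
  let runs := pvBuildRuns values
  -- max((length for key, length in runs if key == roof_value), default=0)
  let lens := (runs.filter (fun kn => kn.1 == roof_value)).map Prod.snd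
  let max_run := (PySem.List.max? lens (fun x => x)).getD 0
  decide (MIN_CONSECUTIVE_ROOF ≤ max_run) &&
    decide (MIN_ROOF_IN_LAST_10 ≤ ((PySem.List.slice values (some (-10)) none).count roof_value : Int))

-- ===== PRECONDITION & SPEC =====
def Spec_is_well_saturated (values : List Int) (roof_value : Int) (out : Bool) : Prop := out = is_well_saturated_alt values roof_value
instance (values : List Int) (roof_value : Int) (out : Bool) : Decidable (Spec_is_well_saturated values roof_value out) := by unfold Spec_is_well_saturated; infer_instance

-- ===== CLAIM (what is proved, stated in full; the proofs are below) =====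
def Claim_equal_is_well_saturated : Prop := ∀ (values : List Int) (roof_value : Int), Dom_is_well_saturated values roof_value → Spec_is_well_saturated values roof_value (is_well_saturated values roof_value)

-- ===== LEMMAS AND PROOFS =====

theorem pvRunLen_le (k : Int) : ∀ xs : List Int, pvRunLen k xs ≤ xs.length := by
  intro xs
  induction xs with
  | nil => simp [pvRunLen]
  | cons x xs ih => simp only [pvRunLen]; split <;> simp <;> omega


-- the best run length reachable from "current run has length c", recursive view of A's scan
def pvG (roof : Int) : List Int → Int → Int
  | [], _ => 0
  | v :: vs, c => if v == roof then max (c + 1) (pvG roof vs (c + 1)) else pvG roof vs 0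

theorem pvFoldA_eq_G (roof : Int) :
    ∀ (l : List Int) (m c : Int), 0 ≤ c → c ≤ m →
      (l.foldl (fun (p : Int × Int) v =>
        if v == roof then
          let cur := p.2 + 1
          (if cur > p.1 then cur else p.1, cur)
        else (p.1, 0)) (m, c)).1 = max m (pvG roof l c) := by
  intro l
  induction l with
  | nil => intro m c h0 hcm; simp [pvG]; omega
  | cons v vs ih =>
    intro m c h0 hcm
    by_cases hv : v == roof
    · simp only [List.foldl_cons, hv, if_true, pvG]
      have h1 : (if c + 1 > m then c + 1 else m) = max m (c + 1) := by omega
      rw [h1, ih (max m (c + 1)) (c + 1) (by omega) (by omega)]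
      omega
    · simp only [List.foldl_cons, hv, if_false, pvG,
        Bool.not_eq_true] at *
      rw [if_neg (by simp [hv]), ih m 0 le_rfl (by omega)]
      simp [hv]

theorem pvG_reset (roof : Int) (r : List Int)
    (h : r = [] ∨ ∃ y ys, r = y :: ys ∧ (y == roof) = false) (c : Int) :
    pvG roof r c = pvG roof r 0 := by
  rcases h with h | ⟨y, ys, rfl, hy⟩
  · subst h; rfl
  · simp [pvG, hy]

theorem pvG_replicate (roof : Int) :
    ∀ (n : Nat), 1 ≤ n → ∀ (r : List Int) (c : Int),
      pvG roof (List.replicate n roof ++ r) c = max (c + n) (pvG roof r (c + n)) := by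
  intro n
  induction n with
  | zero => omega
  | succ k ih =>
    intro _ r c
    by_cases hk : 1 ≤ k
    · simp only [List.replicate_succ, List.cons_append, pvG, BEq.rfl, if_true]
      rw [ih hk r (c + 1)]
      rw [show c + 1 + (k : Int) = c + (((k + 1 : Nat) : Int)) by push_cast; ring]
      omega
    · have : k = 0 := by omega
      subst this
      simp only [List.replicate_succ, List.replicate_zero, List.nil_append,
        List.cons_append, pvG, BEq.rfl, if_true]
      push_cast
      simp [pvG]

theorem pvG_skip (roof : Int) :
    ∀ (t : List Int), (∀ y ∈ t, (y == roof) = false) → ∀ r : List Int,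
      pvG roof (t ++ r) 0 = pvG roof r 0 := by
  intro t
  induction t with
  | nil => intro _ r; rfl
  | cons y ys ih =>
    intro h r
    have hy : (y == roof) = false := h y (by simp)
    simp only [List.cons_append, pvG, hy, if_false]
    exact ih (fun z hz => h z (by simp [hz])) r

theorem pvFoldlMax (L : List Int) : ∀ a : Int, 0 ≤ a →
    L.foldl max a = max a ((PySem.List.max? L (fun x => x)).getD 0) := by
  induction L with
  | nil => intro a ha; simp [PySem.List.max?]; omega
  | cons y t _ =>
    intro a ha
    rw [PySem.List.max?_id_cons]
    have key : ∀ (t : List Int) (a b : Int), t.foldl max (max a b) = max a (t.foldl max b) := by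
      intro t
      induction t with
      | nil => intro a b; simp
      | cons z zs ihz =>
        intro a b
        simp only [List.foldl_cons]
        rw [show max (max a b) z = max a (max b z) by omega, ihz]
    simpa using key t a y

-- elements of the prefix counted by pvRunLen are all equal to k
theorem pvRunLen_take (k : Int) :
    ∀ xs : List Int, ∀ y ∈ xs.take (pvRunLen k xs), y = k := by
  intro xs
  induction xs with
  | nil => simp
  | cons x t ih =>
    by_cases hx : x == k
    · simp only [pvRunLen, hx, if_true, List.take_succ_cons]
      intro y hy
      rcases List.mem_cons.1 hy with h | h
      · subst h; exact (beq_iff_eq).1 hx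
      · exact ih y h
    · simp [pvRunLen, hx]

theorem pvRunLen_drop (k : Int) :
    ∀ xs : List Int, xs.drop (pvRunLen k xs) = [] ∨
      ∃ y ys, xs.drop (pvRunLen k xs) = y :: ys ∧ (y == k) = false := by
  intro xs
  induction xs with
  | nil => left; rfl
  | cons x t ih =>
    by_cases hx : x == k
    · simpa only [pvRunLen, hx, if_true, List.drop_succ_cons] using ih
    · right; exact ⟨x, t, by simp [pvRunLen, hx], by simp [hx]⟩

theorem pvTake_eq_replicate (k : Int) (xs : List Int) :
    xs.take (pvRunLen k xs) = List.replicate (pvRunLen k xs) k := by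
  have h1 : xs.take (pvRunLen k xs) = List.replicate (xs.take (pvRunLen k xs)).length k :=
    List.eq_replicate_of_mem (pvRunLen_take k xs)
  rw [h1, List.length_take, Nat.min_eq_left (pvRunLen_le k xs)]

-- the value B reduces the run list of l to
def pvRes (roof : Int) (l : List Int) : Int :=
  (PySem.List.max? (((pvBuildRuns l).filter (fun kn => kn.1 == roof)).map Prod.snd)
    (fun x => x)).getD 0

theorem pvG_eq_res (roof : Int) :
    ∀ (N : Nat) (l : List Int), l.length ≤ N → pvG roof l 0 = pvRes roof l := by
  intro N
  induction N with
  | zero =>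
    intro l hl
    have : l = [] := by
      cases l with
      | nil => rfl
      | cons a t => simp at hl
    subst this
    simp [pvG, pvRes, pvBuildRuns, PySem.List.max?]
  | succ N ih =>
    intro l hl
    cases l with
    | nil => simp [pvG, pvRes, pvBuildRuns, PySem.List.max?]
    | cons x xs =>
      have hsplit : x :: xs = List.replicate (pvRunLen x xs + 1) x ++ xs.drop (pvRunLen x xs) := by
        rw [List.replicate_succ, List.cons_append]
        congr 1
        conv_lhs => rw [← List.take_append_drop (pvRunLen x xs) xs]
        rw [pvTake_eq_replicate]
      have hrest : (xs.drop (pvRunLen x xs)).length ≤ N := by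
        simp only [List.length_drop, List.length_cons] at *
        omega
      have ihrest := ih _ hrest
      have hdrop := pvRunLen_drop x xs
      by_cases hx : x == roof
      · have hxeq : x = roof := (beq_iff_eq).1 hx
        subst hxeq
        have hGL : pvG x (x :: xs) 0
            = max ((0 : Int) + ((pvRunLen x xs + 1 : Nat) : Int))
                (pvG x (xs.drop (pvRunLen x xs)) 0) := by
          conv_lhs => rw [hsplit]
          rw [pvG_replicate x (pvRunLen x xs + 1) (by omega),
              pvG_reset x _ hdrop]
        rw [hGL, ihrest]
        unfold pvRes
        conv_rhs => rw [show pvBuildRuns (x :: xs)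
          = (x, (pvRunLen x xs : Int) + 1) :: pvBuildRuns (xs.drop (pvRunLen x xs))
          from by rw [pvBuildRuns]]
        simp only [List.filter_cons, hx, if_pos, List.map_cons]
        rw [PySem.List.max?_id_cons, pvFoldlMax _ _ (by push_cast; omega)]
        push_cast
        simp only [Option.getD_some]
        omega
      · simp only [Bool.not_eq_true] at hx
        have hall : ∀ y ∈ xs.take (pvRunLen x xs), (y == roof) = false := by
          intro y hy
          have := pvRunLen_take x xs y hy
          subst this
          exact hx
        have : pvG roof (x :: xs) 0 = pvG roof (xs.drop (pvRunLen x xs)) 0 := by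
          simp only [pvG, hx, if_false]
          conv_lhs => rw [← List.take_append_drop (pvRunLen x xs) xs]
          exact pvG_skip roof _ hall _
        rw [this, ihrest]
        unfold pvRes
        conv_rhs => rw [show pvBuildRuns (x :: xs)
          = (x, (pvRunLen x xs : Int) + 1) :: pvBuildRuns (xs.drop (pvRunLen x xs))
          from by rw [pvBuildRuns]]
        simp [List.filter_cons, hx]

theorem pvTailCount (roof : Int) (l : List Int) :
    l.foldl (fun (acc : Int) v => if v == roof then acc + 1 else acc) 0 = (l.count roof : Int) := by
  simpa using PySem.List.foldl_beq_add_one (l := l) (v := roof) (a := 0)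

-- every run length produced by pvBuildRuns is positive
theorem pvBuildRuns_pos : ∀ (l : List Int) (kn : Int × Int), kn ∈ pvBuildRuns l → 0 < kn.2 := by
  intro l
  induction l using pvBuildRuns.induct with
  | case1 => intro kn h; simp [pvBuildRuns] at h
  | case2 x xs ih =>
    intro kn h
    simp only [pvBuildRuns, List.mem_cons] at h
    rcases h with rfl | h
    · show (0 : Int) < (pvRunLen x xs : Int) + 1
      omega
    · exact ih kn h

-- ===== VERDICT (by name: the statement is the Claim_ definition above) =====
theorem is_well_saturated_spec : Claim_equal_is_well_saturated := by
  intro values roof_value _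
  unfold Spec_is_well_saturated is_well_saturated is_well_saturated_alt
  simp only []
  rw [pvFoldA_eq_G roof_value values 0 0 le_rfl le_rfl,
      pvG_eq_res roof_value values.length values le_rfl,
      pvTailCount]
  unfold pvRes
  have hmax : max 0 (pvRes roof_value values) = pvRes roof_value values := by
    have : 0 ≤ pvRes roof_value values := by
      unfold pvRes
      cases h : PySem.List.max? (((pvBuildRuns values).filter
          (fun kn => kn.1 == roof_value)).map Prod.snd) (fun x => x) with
      | none => simp
      | some m =>
        have hm := PySem.List.max?_mem h
        simp only [List.mem_map, List.mem_filter] at hm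
        obtain ⟨⟨k, n⟩, ⟨hmem, _⟩, rfl⟩ := hm
        have hpos := pvBuildRuns_pos values (k, n) hmem
        simp only [Option.getD_some]
        simpa using hpos.le
    omega
  unfold pvRes at hmax
  rw [hmax]
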